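-- pv_equiv track=rewrite | github.com/joelhed/Deriver | Deriver/main.py | get_consts
-- ===== SOURCE A (Python) =====
-- def get_consts(from_fmlae: list, arb: bool) -> list:
--     char_list = list("".join(from_fmlae))
--     consts = list("abcdefghijklmnopqrst")
--     if not arb:
--         spec_consts = list(set([a for a in char_list if a in consts]))
--         spec_consts.sort()
--         return spec_consts
--     else:
--         arb_consts = list(set([a for a in consts if a not in char_list]))
--         arb_consts.sort()
--         return arb_consts
-- ===== SOURCE B (Python) =====
-- def get_consts(from_fmlae: list, arb: bool) -> list:
--     # Single pass building a 20-bit presence mask, then one ordered scan of the alphabet.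
--     mask = 0
--     for s in from_fmlae:
--         for ch in s:
--             o = ord(ch) - 97
--             if 0 <= o < 20:
--                 mask |= 1 << o
--     return [c for c in "abcdefghijklmnopqrst" if ((mask >> (ord(c) - 97)) & 1 == 1) != arb]
-- ===== Notes on version B (the rewrite author's own statement) =====
-- stated objective: faster
-- what changed: B replaces A's join + set-dedup + explicit sort by a 20-bit presence bitmask accumulated in one pass over the formulas' characters, read back in a single ordered scan of the fixed already-sorted alphabet testing (or complement-testing) bits, so no set, no joined string, no sort and no per-character list scan remain.
import Mathlib
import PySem

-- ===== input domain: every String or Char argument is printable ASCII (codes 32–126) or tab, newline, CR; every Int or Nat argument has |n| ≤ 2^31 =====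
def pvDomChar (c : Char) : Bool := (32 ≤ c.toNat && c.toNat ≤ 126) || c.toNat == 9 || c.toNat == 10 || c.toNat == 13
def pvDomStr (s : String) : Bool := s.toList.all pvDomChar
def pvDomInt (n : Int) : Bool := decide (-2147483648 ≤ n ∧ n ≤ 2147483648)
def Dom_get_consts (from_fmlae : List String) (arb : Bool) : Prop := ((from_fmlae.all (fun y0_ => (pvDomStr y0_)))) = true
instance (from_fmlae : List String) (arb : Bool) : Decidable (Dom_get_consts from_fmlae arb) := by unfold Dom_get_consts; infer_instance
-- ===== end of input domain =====

-- B replaces A's join + set-dedup + sort by a 20-bit presence bitmask built in one pass,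
-- read back by a single ordered scan of the fixed sorted alphabet (objective: alternative).

-- ===== PORT A =====
def get_consts (from_fmlae : List String) (arb : Bool) : List String :=
  let char_list := (PySem.Str.join "" from_fmlae).toList
  let consts := "abcdefghijklmnopqrst".toList
  if !arb then
    let spec_consts := PySem.List.sorted
      (PySem.Set.ofList (char_list.filter (fun a => decide (a ∈ consts)))) (fun x => x) false
    spec_consts.map (fun c => String.ofList [c])
  else
    let arb_consts := PySem.List.sorted
      (PySem.Set.ofList (consts.filter (fun a => !decide (a ∈ char_list)))) (fun x => x) false
    arb_consts.map (fun c => String.ofList [c])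

-- ===== PORT B =====
-- one character of the formulas folded into the 20-bit presence mask
def pvBitStep (m : Nat) (ch : Char) : Nat :=
  if 0 ≤ (ch.toNat : Int) - 97 ∧ (ch.toNat : Int) - 97 < 20
  then m ||| (1 <<< ((ch.toNat : Int) - 97).toNat) else m

def get_consts_alt (from_fmlae : List String) (arb : Bool) : List String :=
  let mask : Nat := from_fmlae.foldl (fun m s => s.toList.foldl pvBitStep m) 0
  ("abcdefghijklmnopqrst".toList.filter
      (fun c => (((mask >>> (c.toNat - 97)) &&& 1 == 1) != arb))).map
    (fun c => String.ofList [c])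

-- ===== PRECONDITION & SPEC =====
def Spec_get_consts (from_fmlae : List String) (arb : Bool) (out : List String) : Prop := out = get_consts_alt from_fmlae arb
instance (from_fmlae : List String) (arb : Bool) (out : List String) : Decidable (Spec_get_consts from_fmlae arb out) := by unfold Spec_get_consts; infer_instance

-- ===== CLAIM (what is proved, stated in full; the proofs are below) =====
def Claim_equal_get_consts : Prop := ∀ (from_fmlae : List String) (arb : Bool), Dom_get_consts from_fmlae arb → Spec_get_consts from_fmlae arb (get_consts from_fmlae arb)

-- ===== LEMMAS AND PROOFS =====

-- The alphabet is strictly increasing and duplicate-free.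
theorem pv_alpha_pairwise : ("abcdefghijklmnopqrst".toList).Pairwise (· < ·) := by decide

-- A filter of the alphabet is strictly increasing.
theorem pv_filter_alpha_pairwise (p : Char → Bool) :
    (("abcdefghijklmnopqrst".toList).filter p).Pairwise (· < ·) :=
  List.Pairwise.sublist List.filter_sublist pv_alpha_pairwise

-- Sorting the dedup of a sub-alphabet list equals filtering the alphabet by membership.
theorem pv_sorted_ofList_eq_filter (xs : List Char)
    (hsub : ∀ a ∈ xs, a ∈ "abcdefghijklmnopqrst".toList) :
    PySem.List.sorted (PySem.Set.ofList xs) (fun x => x) false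
      = ("abcdefghijklmnopqrst".toList).filter (fun c => decide (c ∈ xs)) := by
  apply PySem.List.sorted_eq_of_perm_of_pairwise_lt
  · apply (List.perm_ext_iff_of_nodup (pv_filter_alpha_pairwise _).nodup
      (PySem.Set.nodup_ofList xs)).mpr
    intro a
    simp only [List.mem_filter, PySem.Set.mem_ofList, decide_eq_true_eq]
    exact ⟨fun ⟨_, h⟩ => h, fun h => ⟨hsub a h, h⟩⟩
  · exact pv_filter_alpha_pairwise _

-- A's spec branch as a filter of the alphabet
theorem pv_spec_branch (cl : List Char) :
    PySem.List.sorted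
        (PySem.Set.ofList (cl.filter (fun a => decide (a ∈ "abcdefghijklmnopqrst".toList)))) (fun x => x) false
      = ("abcdefghijklmnopqrst".toList).filter (fun c => decide (c ∈ cl)) := by
  rw [pv_sorted_ofList_eq_filter _ (fun a ha => (List.mem_filter.mp ha).2 |> of_decide_eq_true)]
  apply List.filter_congr
  intro c hc
  simp only [decide_eq_decide, List.mem_filter, decide_eq_true_eq]
  exact ⟨fun h => h.1, fun h => ⟨h, hc⟩⟩

-- A's arb branch as a filter of the alphabet
theorem pv_arb_branch (cl : List Char) :
    PySem.List.sorted
        (PySem.Set.ofList (("abcdefghijklmnopqrst".toList).filter (fun a => !decide (a ∈ cl)))) (fun x => x) false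
      = ("abcdefghijklmnopqrst".toList).filter (fun c => !decide (c ∈ cl)) := by
  rw [PySem.Set.ofList_eq_self_of_nodup _ (pv_filter_alpha_pairwise _).nodup,
    PySem.List.sorted_eq_self_of_pairwise _ _
      ((pv_filter_alpha_pairwise _).imp le_of_lt)]

-- joining with "" concatenates the characters
theorem pv_join_empty_flatten (ps : List (List Char)) :
    PySem.Chars.join [] ps = ps.flatten := by
  match ps with
  | [] => simp [PySem.Chars.join_nil]
  | [p] => simp [PySem.Chars.join_singleton]
  | p :: q :: rest =>
      rw [PySem.Chars.join_cons_cons, pv_join_empty_flatten (q :: rest)]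
      simp

theorem pv_join_toList (l : List String) :
    (PySem.Str.join "" l).toList = (l.map String.toList).flatten := by
  simp [PySem.Str.toList_join, pv_join_empty_flatten]

-- one bit-step: testBit afterwards
theorem pv_testBit_bitStep (m : Nat) (ch : Char) (i : Nat) (hi : i < 20) :
    (pvBitStep m ch).testBit i = (m.testBit i || decide (ch.toNat = 97 + i)) := by
  unfold pvBitStep
  split
  · next h =>
      have hk : ((ch.toNat : Int) - 97).toNat = ch.toNat - 97 := by omega
      simp only [Nat.testBit_or, Nat.one_shiftLeft, Nat.testBit_two_pow, hk]
      congr 1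
      simp only [decide_eq_decide]
      omega
  · next h =>
      have hne : ¬ ch.toNat = 97 + i := by omega
      simp [hne]

-- fold over a character list
theorem pv_testBit_foldl_chars (cs : List Char) (m : Nat) (i : Nat) (hi : i < 20) :
    (cs.foldl pvBitStep m).testBit i
      = (m.testBit i || cs.any (fun ch => decide (ch.toNat = 97 + i))) := by
  induction cs generalizing m with
  | nil => simp
  | cons c t ih =>
      simp only [List.foldl_cons, List.any_cons, ih (pvBitStep m c),
        pv_testBit_bitStep m c i hi]
      cases m.testBit i <;> cases decide (c.toNat = 97 + i) <;> simp

-- fold over the list of strings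
theorem pv_testBit_mask_aux (l : List String) (m : Nat) (i : Nat) (hi : i < 20) :
    (l.foldl (fun (m : Nat) (s : String) => s.toList.foldl pvBitStep m) m).testBit i
      = (m.testBit i || l.any (fun s => s.toList.any (fun ch => decide (ch.toNat = 97 + i)))) := by
  induction l generalizing m with
  | nil => simp
  | cons s t ih =>
      simp only [List.foldl_cons, List.any_cons, ih, pv_testBit_foldl_chars s.toList m i hi,
        Bool.or_assoc]

theorem pv_testBit_mask (l : List String) (i : Nat) (hi : i < 20) :
    (l.foldl (fun (m : Nat) (s : String) => s.toList.foldl pvBitStep m) 0).testBit i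
      = l.any (fun s => s.toList.any (fun ch => decide (ch.toNat = 97 + i))) := by
  simpa using pv_testBit_mask_aux l 0 i hi

-- the shift/and test is testBit
theorem pv_shift_and_testBit (m i : Nat) :
    (((m >>> i) &&& 1) == 1) = m.testBit i := by
  simp [Nat.testBit, Nat.and_comm]

-- every character of the alphabet lies in [97, 117)
theorem pv_alpha_all : ("abcdefghijklmnopqrst".toList.all
    (fun c => decide (97 ≤ c.toNat) && decide (c.toNat < 117))) = true := by decide

theorem pv_alpha_range : ∀ c ∈ "abcdefghijklmnopqrst".toList, 97 ≤ c.toNat ∧ c.toNat < 117 := by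
  intro c hc
  have h := List.all_eq_true.mp pv_alpha_all c hc
  simp at h
  omega

-- the bit test reads back exactly membership in the joined formulas
theorem pv_mask_mem (l : List String) (c : Char) (h97 : 97 ≤ c.toNat) (h117 : c.toNat < 117) :
    ((((l.foldl (fun (m : Nat) (s : String) => s.toList.foldl pvBitStep m) 0) >>> (c.toNat - 97)) &&& 1) == 1)
      = decide (c ∈ (PySem.Str.join "" l).toList) := by
  rw [pv_shift_and_testBit, pv_testBit_mask l (c.toNat - 97) (by omega), pv_join_toList]
  have hch : ∀ ch : Char, (ch.toNat = 97 + (c.toNat - 97)) ↔ ch = c := by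
    intro ch
    constructor
    · intro h
      have h2 : ch.toNat = c.toNat := by omega
      exact Char.ext (UInt32.toNat_inj.mp h2)
    · rintro rfl; omega
  simp only [hch]
  rw [Bool.eq_iff_iff]
  simp only [List.any_eq_true, decide_eq_true_eq, List.mem_flatten, List.mem_map]
  constructor
  · rintro ⟨s, hs, x, hx, rfl⟩
    exact ⟨s.toList, ⟨s, hs, rfl⟩, hx⟩
  · rintro ⟨cs, ⟨s, hs, rfl⟩, hc⟩
    exact ⟨s, hs, c, hc, rfl⟩

-- ===== VERDICT (by name: the statement is the Claim_ definition above) =====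
theorem get_consts_spec : Claim_equal_get_consts := by
  intro from_fmlae arb _
  unfold Spec_get_consts get_consts get_consts_alt
  cases arb with
  | false =>
      rw [Bool.not_false, if_pos rfl, pv_spec_branch]
      apply congrArg
      apply List.filter_congr
      intro c hc
      rw [← pv_mask_mem _ _ (pv_alpha_range c hc).1 (pv_alpha_range c hc).2]
      simp
  | true =>
      rw [Bool.not_true, if_neg (by decide), pv_arb_branch]
      apply congrArg
      apply List.filter_congr
      intro c hc
      rw [← pv_mask_mem _ _ (pv_alpha_range c hc).1 (pv_alpha_range c hc).2]
      cases h : ((List.foldl (fun m s => List.foldl pvBitStep m s.toList) 0 from_fmlae >>> (c.toNat - 97) &&& 1) == 1) <;> simp
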